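-- pv_equiv track=rewrite | github.com/SestrenExsis/CodeKatas | adventofcode/AdventOfCode2018.py | get_rooms
-- ===== SOURCE A (Python) =====
-- import collections
--
-- def get_rooms(route):
--     directions = {
--         'N': (-1, 0),
--         'S': ( 1, 0),
--         'W': ( 0,-1),
--         'E': ( 0, 1),
--     }
--     # Map out all rooms and doors between them
--     rooms = collections.defaultdict(set)
--     row = 0
--     col = 0
--     stack = []
--     for i in range(len(route)):
--         char = route[i]
--         if char == '(':
--             stack.append((row, col))
--         elif char == '|':
--             row, col = stack[-1]
--         elif char == ')':
--             stack.pop()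
--         elif char in directions:
--             row_offset, col_offset = directions[char]
--             next_row, next_col = row + row_offset, col + col_offset
--             rooms[(row, col)].add((next_row, next_col))
--             rooms[(next_row, next_col)].add((row, col))
--             row = next_row
--             col = next_col
--     result = rooms
--     return result
-- ===== SOURCE B (Python) =====
-- import collections
--
-- def get_rooms(route):
--     directions = {
--         'N': (-1, 0),
--         'S': ( 1, 0),
--         'W': ( 0,-1),
--         'E': ( 0, 1),
--     }
--     rooms = collections.defaultdict(set)
--
--     def walk(i, row, col, entry_row, entry_col):
--         # Scan one alternative group starting at index i; return just past its ')'.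
--         while i < len(route):
--             char = route[i]
--             if char == ')':
--                 return i + 1, row, col
--             if char == '|':
--                 row, col = entry_row, entry_col
--             elif char == '(':
--                 i, row, col = walk(i + 1, row, col, row, col)
--                 continue
--             elif char in directions:
--                 row_offset, col_offset = directions[char]
--                 next_room = (row + row_offset, col + col_offset)
--                 rooms[(row, col)].add(next_room)
--                 rooms[next_room].add((row, col))
--                 row, col = next_room
--             i += 1
--         return i, row, col
--
--     walk(0, 0, 0, 0, 0)
--     return rooms
-- ===== Notes on version B (the rewrite author's own statement) =====
-- stated objective: alternative
-- what changed: Replaces A's single linear scan with an explicit (row,col) position stack by a recursive-descent walk over the nested parenthesis groups, where the entry position of each group is held in the recursion (call arguments) instead of a stack and ')' returns the remaining suffix to the caller.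
-- outside the precondition, e.g. on get_rooms('|'): A raises IndexError, B returns {}; on get_rooms(')'): A raises IndexError, B returns {}
import Mathlib
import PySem

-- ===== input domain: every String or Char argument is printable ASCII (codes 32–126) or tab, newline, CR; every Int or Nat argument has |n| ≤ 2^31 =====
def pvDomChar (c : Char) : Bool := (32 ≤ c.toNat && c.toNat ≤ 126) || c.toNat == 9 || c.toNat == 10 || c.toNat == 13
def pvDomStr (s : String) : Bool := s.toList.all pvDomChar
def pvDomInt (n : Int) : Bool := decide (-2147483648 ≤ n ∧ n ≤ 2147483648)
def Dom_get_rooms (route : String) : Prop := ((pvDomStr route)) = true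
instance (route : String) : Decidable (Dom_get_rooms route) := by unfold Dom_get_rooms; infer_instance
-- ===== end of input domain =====

-- B replaces A's explicit position stack by a recursive-descent walk over the nested
-- group structure (objective: alternative decomposition, same cost).

-- Shared state: the defaultdict(set) of rooms.
abbrev RoomsDict := PySem.Dict (Int × Int) (PySem.Set (Int × Int))

-- ===== PORT A =====
-- directions = {'N': (-1,0), 'S': (1,0), 'W': (0,-1), 'E': (0,1)}
def getRoomsDirections : PySem.Dict Char (Int × Int) :=
  PySem.Dict.ofList [('N', (-1, 0)), ('S', (1, 0)), ('W', (0, -1)), ('E', (0, 1))]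

-- one iteration of A's `for i in range(len(route))` loop; state = (rooms, row, col, stack)
-- ('char in directions' + 'directions[char]' is the single match on get?;
--  stack[-1] / stack.pop() are total here with a junk default — Pre_ excludes the
--  inputs on which Python raises IndexError)
def getRoomsStepA (st : RoomsDict × Int × Int × List (Int × Int)) (char : Char) :
    RoomsDict × Int × Int × List (Int × Int) :=
  let (rooms, row, col, stack) := st
  if char = '(' then
    (rooms, row, col, stack ++ [(row, col)])
  else if char = '|' then
    let (row, col) := PySem.List.pyGetD stack (-1) (0, 0)
    (rooms, row, col, stack)
  else if char = ')' then
    (rooms, row, col, stack.dropLast)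
  else
    match getRoomsDirections.get? char with
    | some (row_offset, col_offset) =>
      let next_row := row + row_offset
      let next_col := col + col_offset
      let rooms := rooms.modify (row, col) PySem.Set.empty (fun s => PySem.Set.add s (next_row, next_col))
      let rooms := rooms.modify (next_row, next_col) PySem.Set.empty (fun s => PySem.Set.add s (row, col))
      (rooms, next_row, next_col, stack)
    | none => (rooms, row, col, stack)

def get_rooms (route : String) : List (Int × Int × List (Int × Int)) :=
  let fin := route.toList.foldl getRoomsStepA (PySem.Dict.empty, 0, 0, [])
  fin.1.items.map (fun p => (p.1.1, p.1.2, p.2))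

-- ===== PORT B =====
def getRoomsDirectionsB : PySem.Dict Char (Int × Int) :=
  PySem.Dict.ofList [('N', (-1, 0)), ('S', (1, 0)), ('W', (0, -1)), ('E', (0, 1))]

-- `walk(i, row, col, entry_row, entry_col)`: scans the tail of the route (the chars from i),
-- recursing into subgroups on '(' and returning the remaining suffix on ')'.
-- The while loop is rendered as tail recursion on the char list; `fuel` is only a
-- termination device (fuel = length of the scanned list never runs out).
def getRoomsWalkB (fuel : Nat) (cs : List Char) (row col entry_row entry_col : Int)
    (rooms : RoomsDict) : List Char × Int × Int × RoomsDict :=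
  match fuel, cs with
  | 0, cs => (cs, row, col, rooms)
  | _ + 1, [] => ([], row, col, rooms)
  | f + 1, char :: rest =>
    if char = ')' then
      (rest, row, col, rooms)
    else if char = '|' then
      getRoomsWalkB f rest entry_row entry_col entry_row entry_col rooms
    else if char = '(' then
      let (rest', row', col', rooms') := getRoomsWalkB f rest row col row col rooms
      getRoomsWalkB f rest' row' col' entry_row entry_col rooms'
    else
      match getRoomsDirectionsB.get? char with
      | some (row_offset, col_offset) =>
        let next_row := row + row_offset
        let next_col := col + col_offset
        let rooms := rooms.modify (row, col) PySem.Set.empty (fun s => PySem.Set.add s (next_row, next_col))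
        let rooms := rooms.modify (next_row, next_col) PySem.Set.empty (fun s => PySem.Set.add s (row, col))
        getRoomsWalkB f rest next_row next_col entry_row entry_col rooms
      | none => getRoomsWalkB f rest row col entry_row entry_col rooms

def get_rooms_alt (route : String) : List (Int × Int × List (Int × Int)) :=
  let cs := route.toList
  let fin := getRoomsWalkB cs.length cs 0 0 0 0 PySem.Dict.empty
  fin.2.2.2.items.map (fun p => (p.1.1, p.1.2, p.2))

-- ===== PRECONDITION & SPEC =====
-- Pre_ excludes exactly the routes on which Python A raises IndexError: a '|' or ')'
-- with no enclosing open group (stack empty at stack[-1] / stack.pop()).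
def Pre_get_rooms (route : String) : Prop :=
  ∀ (i : Nat) (h : i < route.toList.length),
    (route.toList[i] = '|' ∨ route.toList[i] = ')') →
    (route.toList.take i).count ')' < (route.toList.take i).count '('
instance (route : String) : Decidable (Pre_get_rooms route) := by unfold Pre_get_rooms; infer_instance

def pvWitness_get_rooms : String := "EN(W|S(N|))EE"

def Spec_get_rooms (route : String) (out : List (Int × Int × List (Int × Int))) : Prop := out = get_rooms_alt route
instance (route : String) (out : List (Int × Int × List (Int × Int))) : Decidable (Spec_get_rooms route out) := by unfold Spec_get_rooms; infer_instance

-- ===== CLAIM (what is proved, stated in full; the proofs are below) =====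
def Claim_equal_get_rooms : Prop := ∀ (route : String), Dom_get_rooms route → Pre_get_rooms route → Spec_get_rooms route (get_rooms route)

-- ===== LEMMAS AND PROOFS =====

-- depth discipline: every '|' and ')' in cs sees a positive open-group depth (start depth n)
def getRoomsOkD : List Char → Nat → Prop
  | [], _ => True
  | c :: t, n =>
    if c = '(' then getRoomsOkD t (n + 1)
    else if c = '|' then 0 < n ∧ getRoomsOkD t n
    else if c = ')' then 0 < n ∧ getRoomsOkD t (n - 1)
    else getRoomsOkD t n

theorem getRoomsPre_okD (cs : List Char) (n : Nat)
    (h : ∀ (i : Nat) (hi : i < cs.length), (cs[i] = '|' ∨ cs[i] = ')') →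
      (cs.take i).count ')' < (cs.take i).count '(' + n) :
    getRoomsOkD cs n := by
  induction cs generalizing n with
  | nil => trivial
  | cons c t ih =>
    have h0 : (c = '|' ∨ c = ')') → 0 < n := by
      intro hc
      have := h 0 (by simp) (by simpa using hc)
      simpa using this
    have hstep : ∀ (k : Nat), (∀ (i : Nat) (hi : i < t.length), (t[i] = '|' ∨ t[i] = ')') →
        (t.take i).count ')' < (t.take i).count '(' + k) → getRoomsOkD t k := ih
    by_cases hc1 : c = '('
    · subst hc1
      simp only [getRoomsOkD, reduceIte]
      apply hstep
      intro i hi hbad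
      have := h (i + 1) (by simpa using Nat.succ_lt_succ hi) (by simpa using hbad)
      simp only [List.take_succ_cons, List.count_cons] at this
      split_ifs at this <;> simp_all <;> omega
    · by_cases hc2 : c = '|'
      · subst hc2
        simp only [getRoomsOkD]
        simp only [reduceIte]
        refine ⟨h0 (Or.inl rfl), hstep n ?_⟩
        intro i hi hbad
        have := h (i + 1) (by simpa using Nat.succ_lt_succ hi) (by simpa using hbad)
        simp only [List.take_succ_cons, List.count_cons] at this
        split_ifs at this <;> simp_all
      · by_cases hc3 : c = ')'
        · subst hc3
          simp only [getRoomsOkD]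
          simp only [reduceIte]
          have hn := h0 (Or.inr rfl)
          refine ⟨hn, hstep (n - 1) ?_⟩
          intro i hi hbad
          have := h (i + 1) (by simpa using Nat.succ_lt_succ hi) (by simpa using hbad)
          simp only [List.take_succ_cons, List.count_cons] at this
          split_ifs at this <;> simp_all <;> omega
        · simp only [getRoomsOkD]
          rw [if_neg hc1, if_neg hc2, if_neg hc3]
          apply hstep
          intro i hi hbad
          have := h (i + 1) (by simpa using Nat.succ_lt_succ hi) (by simpa using hbad)
          simp only [List.take_succ_cons, List.count_cons] at this
          split_ifs at this <;> simp_all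

-- walk only consumes characters: the returned suffix is no longer than the input
theorem getRoomsWalk_len (f : Nat) (cs : List Char) (row col er ec : Int) (rooms : RoomsDict) :
    (getRoomsWalkB f cs row col er ec rooms).1.length ≤ cs.length := by
  induction f generalizing cs row col er ec rooms with
  | zero => simp [getRoomsWalkB]
  | succ f ih =>
    cases cs with
    | nil => simp [getRoomsWalkB]
    | cons c rest =>
      simp only [getRoomsWalkB]
      split_ifs with h1 h2 h3
      · simp
      · exact le_trans (ih ..) (by simp)
      · rcases hw : getRoomsWalkB f rest row col row col rooms with ⟨rest', row', col', rooms'⟩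
        have h1 : rest'.length ≤ rest.length := by
          have := ih rest row col row col rooms
          rw [hw] at this; exact this
        calc (getRoomsWalkB f rest' row' col' er ec rooms').1.length
            ≤ rest'.length := ih ..
          _ ≤ (c :: rest).length := by simp; omega
      · cases hd : getRoomsDirectionsB.get? c with
        | none => exact le_trans (ih ..) (by simp)
        | some v =>
          rcases v with ⟨ro, co⟩
          exact le_trans (ih ..) (by simp)

-- main correspondence: A's fold with stack st ++ [(er,ec)] over cs equals A's fold over the
-- suffix walk returns, resumed from walk's state with stack st (the ')' having been popped)
theorem getRoomsWalk_fold (f : Nat) : ∀ (cs : List Char), cs.length ≤ f →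
    ∀ (row col er ec : Int) (st : List (Int × Int)) (rooms : RoomsDict)
      (rest : List Char) (r' c' : Int) (d' : RoomsDict),
    getRoomsWalkB f cs row col er ec rooms = (rest, r', c', d') →
    ∃ st', cs.foldl getRoomsStepA (rooms, row, col, st ++ [(er, ec)]) =
             rest.foldl getRoomsStepA (d', r', c', st') ∧ (rest ≠ [] → st' = st) := by
  induction f with
  | zero =>
    intro cs hlen row col er ec st rooms rest r' c' d' hw
    have : cs = [] := List.length_eq_zero_iff.mp (Nat.le_zero.mp hlen)
    subst this
    simp only [getRoomsWalkB] at hw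
    injection hw with e1 e2; injection e2 with e2 e3; injection e3 with e3 e4
    subst e1; subst e2; subst e3; subst e4
    exact ⟨st ++ [(er, ec)], by simp, by simp⟩
  | succ f ih =>
    intro cs hlen row col er ec st rooms rest r' c' d' hw
    cases cs with
    | nil =>
      simp only [getRoomsWalkB] at hw
      injection hw with e1 e2; injection e2 with e2 e3; injection e3 with e3 e4
      subst e1; subst e2; subst e3; subst e4
      exact ⟨st ++ [(er, ec)], by simp, by simp⟩
    | cons c rest₀ =>
      have hlen₀ : rest₀.length ≤ f := by simpa using hlen
      simp only [getRoomsWalkB] at hw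
      rw [List.foldl_cons]
      by_cases h1 : c = ')'
      · rw [if_pos h1] at hw
        injection hw with e1 e2; injection e2 with e2 e3; injection e3 with e3 e4
        subst e1; subst e2; subst e3; subst e4
        refine ⟨st, ?_, fun _ => rfl⟩
        have hstep : getRoomsStepA (rooms, row, col, st ++ [(er, ec)]) c =
            (rooms, row, col, st) := by
          subst h1; simp [getRoomsStepA]
        rw [hstep]
      · rw [if_neg h1] at hw
        by_cases h2 : c = '|'
        · rw [if_pos h2] at hw
          have hstep : getRoomsStepA (rooms, row, col, st ++ [(er, ec)]) c =
              (rooms, er, ec, st ++ [(er, ec)]) := by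
            subst h2; simp [getRoomsStepA, PySem.List.pyGetD_neg_one_append_singleton]
          rw [hstep]
          exact ih rest₀ hlen₀ er ec er ec st rooms rest r' c' d' hw
        · rw [if_neg h2] at hw
          by_cases h3 : c = '('
          · rw [if_pos h3] at hw
            rcases hw₁ : getRoomsWalkB f rest₀ row col row col rooms with ⟨rest₁, r₁, c₁, d₁⟩
            rw [hw₁] at hw
            have hstep : getRoomsStepA (rooms, row, col, st ++ [(er, ec)]) c =
                (rooms, row, col, (st ++ [(er, ec)]) ++ [(row, col)]) := by
              subst h3; simp [getRoomsStepA]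
            rw [hstep]
            obtain ⟨st₁, heq₁, hst₁⟩ :=
              ih rest₀ hlen₀ row col row col (st ++ [(er, ec)]) rooms rest₁ r₁ c₁ d₁ hw₁
            by_cases hrest₁ : rest₁ = []
            · subst hrest₁
              have hnil : getRoomsWalkB f ([] : List Char) r₁ c₁ er ec d₁ = ([], r₁, c₁, d₁) := by
                cases f <;> rfl
              rw [hnil] at hw
              injection hw with e1 e2; injection e2 with e2 e3; injection e3 with e3 e4
              subst e1; subst e2; subst e3; subst e4
              exact ⟨st₁, by simpa using heq₁, by simp⟩
            · have hst₁' := hst₁ hrest₁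
              subst hst₁'
              have hlen₁ : rest₁.length ≤ f := by
                have h := getRoomsWalk_len f rest₀ row col row col rooms
                rw [hw₁] at h
                exact le_trans h hlen₀
              obtain ⟨st', heq₂, hst'⟩ :=
                ih rest₁ hlen₁ r₁ c₁ er ec st d₁ rest r' c' d' hw
              exact ⟨st', heq₁.trans heq₂, hst'⟩
          · rw [if_neg h3] at hw
            cases hd : getRoomsDirectionsB.get? c with
            | none =>
              rw [hd] at hw
              have hstep : getRoomsStepA (rooms, row, col, st ++ [(er, ec)]) c =
                  (rooms, row, col, st ++ [(er, ec)]) := by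
                simp only [getRoomsStepA, if_neg h3, if_neg h2, if_neg h1]
                have hd' : getRoomsDirections.get? c = none := hd
                simp [hd']
              rw [hstep]
              exact ih rest₀ hlen₀ row col er ec st rooms rest r' c' d' hw
            | some v =>
              rcases v with ⟨ro, co⟩
              rw [hd] at hw
              have hd' : getRoomsDirections.get? c = some (ro, co) := hd
              have hstep : getRoomsStepA (rooms, row, col, st ++ [(er, ec)]) c =
                  ((rooms.modify (row, col) PySem.Set.empty (fun s => PySem.Set.add s (row + ro, col + co))).modify
                      (row + ro, col + co) PySem.Set.empty (fun s => PySem.Set.add s (row, col)),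
                    row + ro, col + co, st ++ [(er, ec)]) := by
                simp only [getRoomsStepA, if_neg h3, if_neg h2, if_neg h1]
                simp [hd']
              rw [hstep]
              exact ih rest₀ hlen₀ (row + ro) (col + co) er ec st _ rest r' c' d' hw

-- under the depth discipline, walk consumes everything (n = 0) / leaves a suffix ok at n-1
theorem getRoomsWalk_okD (f : Nat) : ∀ (cs : List Char), cs.length ≤ f →
    ∀ (n : Nat) (row col er ec : Int) (rooms : RoomsDict),
    getRoomsOkD cs n →
    ((n = 0 → (getRoomsWalkB f cs row col er ec rooms).1 = []) ∧
     ∀ m, n = m + 1 → getRoomsOkD (getRoomsWalkB f cs row col er ec rooms).1 m) := by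
  induction f with
  | zero =>
    intro cs hlen n row col er ec rooms _
    have : cs = [] := List.length_eq_zero_iff.mp (Nat.le_zero.mp hlen)
    subst this
    exact ⟨fun _ => rfl, fun m _ => trivial⟩
  | succ f ih =>
    intro cs hlen n row col er ec rooms hok
    cases cs with
    | nil => exact ⟨fun _ => rfl, fun m _ => trivial⟩
    | cons c rest₀ =>
      have hlen₀ : rest₀.length ≤ f := by simpa using hlen
      simp only [getRoomsWalkB]
      by_cases h1 : c = ')'
      · rw [if_pos h1]
        subst h1
        simp only [getRoomsOkD, reduceIte] at hok
        obtain ⟨hn, hok2⟩ := hok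
        exact ⟨fun h0 => absurd h0 (by omega), fun m hm => by
          have : n - 1 = m := by omega
          simpa [this] using hok2⟩
      · rw [if_neg h1]
        by_cases h2 : c = '|'
        · rw [if_pos h2]
          have hok' : 0 < n ∧ getRoomsOkD rest₀ n := by
            subst h2; simpa only [getRoomsOkD, reduceIte] using hok
          have := ih rest₀ hlen₀ n er ec er ec rooms hok'.2
          exact ⟨fun h0 => absurd h0 (by omega), this.2⟩
        · rw [if_neg h2]
          by_cases h3 : c = '('
          · rw [if_pos h3]
            have hok' : getRoomsOkD rest₀ (n + 1) := by
              subst h3; simpa only [getRoomsOkD, reduceIte] using hok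
            rcases hw₁ : getRoomsWalkB f rest₀ row col row col rooms with ⟨rest₁, r₁, c₁, d₁⟩
            have hok₁ : getRoomsOkD rest₁ n := by
              have := (ih rest₀ hlen₀ (n + 1) row col row col rooms hok').2 n rfl
              rwa [hw₁] at this
            have hlen₁ : rest₁.length ≤ f := by
              have h := getRoomsWalk_len f rest₀ row col row col rooms
              rw [hw₁] at h
              exact le_trans h hlen₀
            exact ih rest₁ hlen₁ n r₁ c₁ er ec d₁ hok₁
          · rw [if_neg h3]
            have hok' : getRoomsOkD rest₀ n := by
              simpa only [getRoomsOkD, if_neg h3, if_neg h2, if_neg h1] using hok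
            cases hd : getRoomsDirectionsB.get? c with
            | none => exact ih rest₀ hlen₀ n row col er ec rooms hok'
            | some v =>
              rcases v with ⟨ro, co⟩
              exact ih rest₀ hlen₀ n (row + ro) (col + co) er ec _ hok' 

-- padding A's stack with one frame at the bottom changes nothing but the stack,
-- as long as the depth discipline keeps the bottom frame unread
theorem getRoomsFold_pad (cs : List Char) : ∀ (st : List (Int × Int)) (x : Int × Int)
    (rooms : RoomsDict) (row col : Int), getRoomsOkD cs st.length →
    (cs.foldl getRoomsStepA (rooms, row, col, x :: st)).1 = (cs.foldl getRoomsStepA (rooms, row, col, st)).1 ∧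
    (cs.foldl getRoomsStepA (rooms, row, col, x :: st)).2.1 = (cs.foldl getRoomsStepA (rooms, row, col, st)).2.1 ∧
    (cs.foldl getRoomsStepA (rooms, row, col, x :: st)).2.2.1 = (cs.foldl getRoomsStepA (rooms, row, col, st)).2.2.1 := by
  induction cs with
  | nil => exact fun st x rooms row col _ => ⟨rfl, rfl, rfl⟩
  | cons c t ih =>
    intro st x rooms row col hok
    rw [List.foldl_cons, List.foldl_cons]
    by_cases h1 : c = '('
    · have hok' : getRoomsOkD t (st.length + 1) := by
        subst h1; simpa only [getRoomsOkD, reduceIte] using hok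
      have e1 : getRoomsStepA (rooms, row, col, x :: st) c = (rooms, row, col, x :: (st ++ [(row, col)])) := by
        subst h1; simp [getRoomsStepA]
      have e2 : getRoomsStepA (rooms, row, col, st) c = (rooms, row, col, st ++ [(row, col)]) := by
        subst h1; simp [getRoomsStepA]
      rw [e1, e2]
      exact ih (st ++ [(row, col)]) x rooms row col (by simpa using hok')
    · by_cases h2 : c = '|'
      · have hok' : 0 < st.length ∧ getRoomsOkD t st.length := by
          subst h2; simpa only [getRoomsOkD, reduceIte, if_neg h1] using hok
        have hne : st ≠ [] := by
          intro h; rw [h] at hok'; exact absurd hok'.1 (by simp)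
        have hlast : PySem.List.pyGetD (x :: st) (-1) ((0 : Int), (0 : Int)) =
            PySem.List.pyGetD st (-1) ((0 : Int), (0 : Int)) := by
          rw [PySem.List.pyGetD_neg_one (x :: st) _ (by simp),
              PySem.List.pyGetD_neg_one st _ hne]
          exact List.getLast_cons hne
        have e1 : getRoomsStepA (rooms, row, col, x :: st) c =
            (rooms, (PySem.List.pyGetD st (-1) ((0 : Int), (0 : Int))).1,
              (PySem.List.pyGetD st (-1) ((0 : Int), (0 : Int))).2, x :: st) := by
          subst h2; simp [getRoomsStepA, hlast]
        have e2 : getRoomsStepA (rooms, row, col, st) c =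
            (rooms, (PySem.List.pyGetD st (-1) ((0 : Int), (0 : Int))).1,
              (PySem.List.pyGetD st (-1) ((0 : Int), (0 : Int))).2, st) := by
          subst h2; simp [getRoomsStepA]
        rw [e1, e2]
        exact ih st x rooms _ _ hok'.2
      · by_cases h3 : c = ')'
        · have hok' : 0 < st.length ∧ getRoomsOkD t (st.length - 1) := by
            subst h3; simpa only [getRoomsOkD, reduceIte, if_neg h1, if_neg h2] using hok
          have hne : st ≠ [] := by
            intro h; rw [h] at hok'; exact absurd hok'.1 (by simp)
          obtain ⟨y, st'', rfl⟩ := List.exists_cons_of_ne_nil hne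
          have e1 : getRoomsStepA (rooms, row, col, x :: y :: st'') c =
              (rooms, row, col, x :: (y :: st'').dropLast) := by
            subst h3; simp [getRoomsStepA]
          have e2 : getRoomsStepA (rooms, row, col, y :: st'') c =
              (rooms, row, col, (y :: st'').dropLast) := by
            subst h3; simp [getRoomsStepA]
          rw [e1, e2]
          refine ih ((y :: st'').dropLast) x rooms row col ?_
          have : ((y :: st'').dropLast).length = (y :: st'').length - 1 := by
            simp [List.length_dropLast]
          rw [this]
          exact hok'.2
        · have hok' : getRoomsOkD t st.length := by
            simpa only [getRoomsOkD, if_neg h1, if_neg h2, if_neg h3] using hok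
          cases hd : getRoomsDirections.get? c with
          | none =>
            have e1 : getRoomsStepA (rooms, row, col, x :: st) c = (rooms, row, col, x :: st) := by
              simp only [getRoomsStepA, if_neg h1, if_neg h2, if_neg h3]; simp [hd]
            have e2 : getRoomsStepA (rooms, row, col, st) c = (rooms, row, col, st) := by
              simp only [getRoomsStepA, if_neg h1, if_neg h2, if_neg h3]; simp [hd]
            rw [e1, e2]
            exact ih st x rooms row col hok'
          | some v =>
            rcases v with ⟨ro, co⟩
            have e1 : getRoomsStepA (rooms, row, col, x :: st) c =
                ((rooms.modify (row, col) PySem.Set.empty (fun s => PySem.Set.add s (row + ro, col + co))).modify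
                    (row + ro, col + co) PySem.Set.empty (fun s => PySem.Set.add s (row, col)),
                  row + ro, col + co, x :: st) := by
              simp only [getRoomsStepA, if_neg h1, if_neg h2, if_neg h3]; simp [hd]
            have e2 : getRoomsStepA (rooms, row, col, st) c =
                ((rooms.modify (row, col) PySem.Set.empty (fun s => PySem.Set.add s (row + ro, col + co))).modify
                    (row + ro, col + co) PySem.Set.empty (fun s => PySem.Set.add s (row, col)),
                  row + ro, col + co, st) := by
              simp only [getRoomsStepA, if_neg h1, if_neg h2, if_neg h3]; simp [hd]
            rw [e1, e2]
            exact ih st x _ _ _ hok' 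

-- ===== VERDICT (by name: the statement is the Claim_ definition above) =====
theorem get_rooms_spec : Claim_equal_get_rooms := by
  intro route _ hpre
  unfold Spec_get_rooms get_rooms get_rooms_alt
  have hok : getRoomsOkD route.toList 0 :=
    getRoomsPre_okD route.toList 0 (by simpa using hpre)
  rcases hw : getRoomsWalkB route.toList.length route.toList 0 0 0 0 PySem.Dict.empty
    with ⟨rest, r', c', d'⟩
  have hrest : rest = [] := by
    have h := (getRoomsWalk_okD route.toList.length route.toList le_rfl 0 0 0 0 0
      PySem.Dict.empty hok).1 rfl
    rwa [hw] at h
  subst hrest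
  obtain ⟨st', heq, -⟩ := getRoomsWalk_fold route.toList.length route.toList le_rfl
    0 0 0 0 [] PySem.Dict.empty [] r' c' d' hw
  have hpad := getRoomsFold_pad route.toList [] ((0 : Int), (0 : Int))
    PySem.Dict.empty 0 0 (by simpa using hok)
  have hdict : (route.toList.foldl getRoomsStepA (PySem.Dict.empty, 0, 0, ([] : List (Int × Int)))).1 = d' := by
    have h1 : (route.toList.foldl getRoomsStepA
        (PySem.Dict.empty, 0, 0, [((0 : Int), (0 : Int))])).1 = d' := by
      simp only [List.nil_append] at heq
      rw [heq]
      rfl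
    rw [← h1]
    exact hpad.1.symm
  simp only [hw, hdict]
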